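-- pv_equiv track=rewrite | github.com/kentaro-nakanishi/Matrix_Project | main.py | transP3_unite
-- ===== SOURCE A (Python) =====
-- def transP3_unite(time_list,pitch_list,voice_list,velocity_list,pan_list,attack_list,tonecolor_list):
--     '''
--     変換代数後の結合層  tpv直積体を取り、音素に分解する。
--     '''
--
--     new_time_list =[]
--     new_pitch_list =[]
--     new_voice_list =[]
--     new_velocity_list =[]
--     new_pan_list=[]
--     new_attack_list=[]
--     new_tonecolor_list=[]
--
--     for index in range(len(time_list)):
--
--
--         for time in time_list[index]:
--             for pitch in pitch_list[index]:
--                 for voice in voice_list[index]: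
--                     for velocity in velocity_list[index]:
--                         for pan in pan_list[index]:
--                             for attack in attack_list[index]:
--                                 for tonecolor in tonecolor_list[index]:
--
--                                     new_time_list.append(time)
--                                     new_pitch_list.append(pitch)
--                                     new_voice_list.append(voice)
--                                     new_velocity_list.append(velocity)
--                                     new_pan_list.append(pan)
--                                     new_attack_list.append(attack)
--                                     new_tonecolor_list.append([tonecolor,len(tonecolor_list[index])]) ####MIXING_TOOL
--
--
--     return new_time_list,new_pitch_list,new_voice_list,new_velocity_list,new_pan_list,new_attack_list,new_tonecolor_list
-- ===== SOURCE B (Python) =====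
-- def transP3_unite(time_list,pitch_list,voice_list,velocity_list,pan_list,attack_list,tonecolor_list):
--     # Seven independent per-column tiling passes instead of one 7-deep nested loop.
--     out = ([], [], [], [], [], [], [])
--     for idx in range(len(time_list)):
--         rows = (time_list[idx], pitch_list[idx], voice_list[idx], velocity_list[idx],
--                 pan_list[idx], attack_list[idx], tonecolor_list[idx])
--         s0, s1, s2, s3, s4, s5, s6 = (len(r) for r in rows)
--         n = s6
--         blocks = [
--             [v for v in rows[0] for _ in range(s1 * (s2 * (s3 * (s4 * (s5 * s6)))))],
--             [v for v in rows[1] for _ in range(s2 * (s3 * (s4 * (s5 * s6))))],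
--             [v for v in rows[2] for _ in range(s3 * (s4 * (s5 * s6)))],
--             [v for v in rows[3] for _ in range(s4 * (s5 * s6))],
--             [v for v in rows[4] for _ in range(s5 * s6)],
--             [v for v in rows[5] for _ in range(s6)],
--             [[v, n] for v in rows[6]],
--         ]
--         outers = [1, s0, s0 * s1, s0 * (s1 * s2), s0 * (s1 * (s2 * s3)),
--                   s0 * (s1 * (s2 * (s3 * s4))), s0 * (s1 * (s2 * (s3 * (s4 * s5))))]
--         for j in range(7):
--             out[j].extend(blocks[j] * outers[j])
--     return out
-- ===== Notes on version B (the rewrite author's own statement) =====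
-- stated objective: alternative
-- what changed: Replaces the single 7-deep nested enumeration with seven independent per-column tiling passes: each output column is built directly from repeat-count products of the row sizes (block * outer repetitions) instead of being appended inside the innermost loop.
-- outside the precondition, e.g. on transP3_unite([[]], [], [], [], [], [], []): A returns ([], [], [], [], [], [], []), B raises IndexError
import Mathlib
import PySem

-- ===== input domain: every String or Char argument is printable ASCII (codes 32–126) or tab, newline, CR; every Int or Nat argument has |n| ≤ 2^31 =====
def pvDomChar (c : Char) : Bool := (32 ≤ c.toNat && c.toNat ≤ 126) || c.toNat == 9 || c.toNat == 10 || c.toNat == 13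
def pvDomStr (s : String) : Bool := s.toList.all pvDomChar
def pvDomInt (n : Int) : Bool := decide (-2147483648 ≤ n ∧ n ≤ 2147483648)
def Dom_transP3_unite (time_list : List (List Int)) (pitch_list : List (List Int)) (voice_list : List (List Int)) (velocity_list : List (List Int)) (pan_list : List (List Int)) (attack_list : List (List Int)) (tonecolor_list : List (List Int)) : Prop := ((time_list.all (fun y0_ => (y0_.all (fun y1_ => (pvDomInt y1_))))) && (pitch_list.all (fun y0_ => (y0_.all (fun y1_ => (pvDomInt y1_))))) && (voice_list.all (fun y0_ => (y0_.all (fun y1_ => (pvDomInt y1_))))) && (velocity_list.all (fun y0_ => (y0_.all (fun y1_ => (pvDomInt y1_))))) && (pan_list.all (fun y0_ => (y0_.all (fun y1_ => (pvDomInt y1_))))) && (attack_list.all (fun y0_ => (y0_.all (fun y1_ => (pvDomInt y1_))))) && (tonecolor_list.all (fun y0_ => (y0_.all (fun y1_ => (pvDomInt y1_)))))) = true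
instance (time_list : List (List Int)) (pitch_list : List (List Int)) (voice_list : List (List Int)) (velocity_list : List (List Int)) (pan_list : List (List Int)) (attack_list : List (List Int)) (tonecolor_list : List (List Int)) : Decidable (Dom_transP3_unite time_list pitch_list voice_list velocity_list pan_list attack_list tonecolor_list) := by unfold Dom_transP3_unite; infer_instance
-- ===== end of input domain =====

-- B replaces A's 7-deep nested enumeration by seven independent per-column tiling passes
-- (block-repetition counts computed from the row lengths); return values agree on Pre_.

-- state: the seven output columns
abbrev PvSt : Type := List Int × List Int × List Int × List Int × List Int × List Int × List (List Int)

-- ===== PORT A =====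
-- innermost loop: for tonecolor in tonecolor_list[index]
def pvLoop7 (nn : Int) (time pitch voice velocity pan attack : Int) (l6 : List Int) (acc : PvSt) : PvSt :=
  l6.foldl (fun acc tonecolor =>
    match acc with
    | (a0, a1, a2, a3, a4, a5, a6) =>
      (a0 ++ [time], a1 ++ [pitch], a2 ++ [voice], a3 ++ [velocity],
       a4 ++ [pan], a5 ++ [attack], a6 ++ [[tonecolor, nn]])) acc

def pvLoop6 (nn : Int) (time pitch voice velocity pan : Int) (l5 l6 : List Int) (acc : PvSt) : PvSt :=
  l5.foldl (fun acc attack => pvLoop7 nn time pitch voice velocity pan attack l6 acc) acc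

def pvLoop5 (nn : Int) (time pitch voice velocity : Int) (l4 l5 l6 : List Int) (acc : PvSt) : PvSt :=
  l4.foldl (fun acc pan => pvLoop6 nn time pitch voice velocity pan l5 l6 acc) acc

def pvLoop4 (nn : Int) (time pitch voice : Int) (l3 l4 l5 l6 : List Int) (acc : PvSt) : PvSt :=
  l3.foldl (fun acc velocity => pvLoop5 nn time pitch voice velocity l4 l5 l6 acc) acc

def pvLoop3 (nn : Int) (time pitch : Int) (l2 l3 l4 l5 l6 : List Int) (acc : PvSt) : PvSt :=
  l2.foldl (fun acc voice => pvLoop4 nn time pitch voice l3 l4 l5 l6 acc) acc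

def pvLoop2 (nn : Int) (time : Int) (l1 l2 l3 l4 l5 l6 : List Int) (acc : PvSt) : PvSt :=
  l1.foldl (fun acc pitch => pvLoop3 nn time pitch l2 l3 l4 l5 l6 acc) acc

def pvLoop1 (nn : Int) (l0 l1 l2 l3 l4 l5 l6 : List Int) (acc : PvSt) : PvSt :=
  l0.foldl (fun acc time => pvLoop2 nn time l1 l2 l3 l4 l5 l6 acc) acc

-- for index in range(len(time_list)): nested loops appending to the seven accumulators.
-- time_list[index] is always in range; the other six lookups are in range on Pre_ (getD is exact there).
def transP3_unite (time_list : List (List Int)) (pitch_list : List (List Int)) (voice_list : List (List Int)) (velocity_list : List (List Int)) (pan_list : List (List Int)) (attack_list : List (List Int)) (tonecolor_list : List (List Int)) : List Int × List Int × List Int × List Int × List Int × List Int × List (List Int) :=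
  (List.range time_list.length).foldl (fun acc index =>
    pvLoop1 ((tonecolor_list.getD index []).length : Int)
      (time_list.getD index []) (pitch_list.getD index []) (voice_list.getD index [])
      (velocity_list.getD index []) (pan_list.getD index []) (attack_list.getD index [])
      (tonecolor_list.getD index []) acc)
    ([], [], [], [], [], [], [])

-- ===== PORT B =====
-- block * outer（Python list repetition)
def pvRep {α : Type} (m : Nat) (xs : List α) : List α := (List.replicate m xs).flatten
-- [v for v in l for _ in range(inner)]
def pvTile (inner : Nat) (l : List Int) : List Int := l.flatMap (fun x => List.replicate inner x)

def transP3_unite_alt (time_list : List (List Int)) (pitch_list : List (List Int)) (voice_list : List (List Int)) (velocity_list : List (List Int)) (pan_list : List (List Int)) (attack_list : List (List Int)) (tonecolor_list : List (List Int)) : List Int × List Int × List Int × List Int × List Int × List Int × List (List Int) :=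
  (List.range time_list.length).foldl (fun acc idx =>
    let r0 := time_list.getD idx []
    let r1 := pitch_list.getD idx []
    let r2 := voice_list.getD idx []
    let r3 := velocity_list.getD idx []
    let r4 := pan_list.getD idx []
    let r5 := attack_list.getD idx []
    let r6 := tonecolor_list.getD idx []
    let s0 := r0.length
    let s1 := r1.length
    let s2 := r2.length
    let s3 := r3.length
    let s4 := r4.length
    let s5 := r5.length
    let s6 := r6.length
    match acc with
    | (a0, a1, a2, a3, a4, a5, a6) =>
      (a0 ++ pvRep 1 (pvTile (s1 * (s2 * (s3 * (s4 * (s5 * s6))))) r0),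
       a1 ++ pvRep s0 (pvTile (s2 * (s3 * (s4 * (s5 * s6)))) r1),
       a2 ++ pvRep (s0 * s1) (pvTile (s3 * (s4 * (s5 * s6))) r2),
       a3 ++ pvRep (s0 * (s1 * s2)) (pvTile (s4 * (s5 * s6)) r3),
       a4 ++ pvRep (s0 * (s1 * (s2 * s3))) (pvTile (s5 * s6) r4),
       a5 ++ pvRep (s0 * (s1 * (s2 * (s3 * s4)))) (pvTile s6 r5),
       a6 ++ pvRep (s0 * (s1 * (s2 * (s3 * (s4 * s5))))) (r6.map (fun v => [v, (s6 : Int)]))))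
    ([], [], [], [], [], [], [])

-- ===== PRECONDITION & SPEC =====
-- Pre_ excludes inputs where one of the six other lists is shorter than time_list: there A raises
-- IndexError, except accidentally when an earlier row at that index is empty so the out-of-range
-- lookup is short-circuited and A still returns (B's index pass raises there instead).
def Pre_transP3_unite (time_list : List (List Int)) (pitch_list : List (List Int)) (voice_list : List (List Int)) (velocity_list : List (List Int)) (pan_list : List (List Int)) (attack_list : List (List Int)) (tonecolor_list : List (List Int)) : Prop :=
  time_list.length ≤ pitch_list.length ∧ time_list.length ≤ voice_list.length ∧
  time_list.length ≤ velocity_list.length ∧ time_list.length ≤ pan_list.length ∧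
  time_list.length ≤ attack_list.length ∧ time_list.length ≤ tonecolor_list.length
instance (time_list : List (List Int)) (pitch_list : List (List Int)) (voice_list : List (List Int)) (velocity_list : List (List Int)) (pan_list : List (List Int)) (attack_list : List (List Int)) (tonecolor_list : List (List Int)) : Decidable (Pre_transP3_unite time_list pitch_list voice_list velocity_list pan_list attack_list tonecolor_list) := by unfold Pre_transP3_unite; infer_instance

def pvWitness_transP3_unite : List (List Int) × List (List Int) × List (List Int) × List (List Int) × List (List Int) × List (List Int) × List (List Int) :=
  ([[1], [2, 3]], [[4], [9]], [[5], [0]], [[6], [1]], [[0], [2]], [[1], [3]], [[2, 7], [8]])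

def Spec_transP3_unite (time_list : List (List Int)) (pitch_list : List (List Int)) (voice_list : List (List Int)) (velocity_list : List (List Int)) (pan_list : List (List Int)) (attack_list : List (List Int)) (tonecolor_list : List (List Int)) (out : List Int × List Int × List Int × List Int × List Int × List Int × List (List Int)) : Prop := out = transP3_unite_alt time_list pitch_list voice_list velocity_list pan_list attack_list tonecolor_list
instance (time_list : List (List Int)) (pitch_list : List (List Int)) (voice_list : List (List Int)) (velocity_list : List (List Int)) (pan_list : List (List Int)) (attack_list : List (List Int)) (tonecolor_list : List (List Int)) (out : List Int × List Int × List Int × List Int × List Int × List Int × List (List Int)) : Decidable (Spec_transP3_unite time_list pitch_list voice_list velocity_list pan_list attack_list tonecolor_list out) := by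
  unfold Spec_transP3_unite
  haveI h1 : DecidableEq (List Int × List (List Int)) := instDecidableEqProd
  haveI h2 : DecidableEq (List Int × List Int × List (List Int)) := instDecidableEqProd
  haveI h3 : DecidableEq (List Int × List Int × List Int × List (List Int)) := instDecidableEqProd
  haveI h4 : DecidableEq (List Int × List Int × List Int × List Int × List (List Int)) := instDecidableEqProd
  haveI h5 : DecidableEq (List Int × List Int × List Int × List Int × List Int × List (List Int)) := instDecidableEqProd
  haveI h6 : DecidableEq (List Int × List Int × List Int × List Int × List Int × List Int × List (List Int)) := instDecidableEqProd
  exact h6 _ _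

-- ===== CLAIM (what is proved, stated in full; the proofs are below) =====
def Claim_equal_transP3_unite : Prop := ∀ (time_list : List (List Int)) (pitch_list : List (List Int)) (voice_list : List (List Int)) (velocity_list : List (List Int)) (pan_list : List (List Int)) (attack_list : List (List Int)) (tonecolor_list : List (List Int)), Dom_transP3_unite time_list pitch_list voice_list velocity_list pan_list attack_list tonecolor_list → Pre_transP3_unite time_list pitch_list voice_list velocity_list pan_list attack_list tonecolor_list → Spec_transP3_unite time_list pitch_list voice_list velocity_list pan_list attack_list tonecolor_list (transP3_unite time_list pitch_list voice_list velocity_list pan_list attack_list tonecolor_list)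

-- ===== LEMMAS AND PROOFS =====

theorem pvRep_zero {α : Type} (xs : List α) : pvRep 0 xs = [] := rfl

theorem pvRep_succ {α : Type} (m : Nat) (xs : List α) : pvRep (m + 1) xs = xs ++ pvRep m xs := by
  simp [pvRep, List.replicate_succ]

theorem pvRep_one {α : Type} (xs : List α) : pvRep 1 xs = xs := by
  simp [pvRep]

theorem pvRep_add {α : Type} (a b : Nat) (xs : List α) :
    pvRep (a + b) xs = pvRep a xs ++ pvRep b xs := by
  induction a with
  | zero => simp [pvRep_zero]
  | succ a ih =>
      rw [Nat.add_right_comm, pvRep_succ, ih, pvRep_succ, List.append_assoc]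

theorem pvRep_rep {α : Type} (a b : Nat) (xs : List α) :
    pvRep a (pvRep b xs) = pvRep (a * b) xs := by
  induction a with
  | zero => simp [pvRep_zero]
  | succ a ih =>
      rw [pvRep_succ, ih, Nat.succ_mul, Nat.add_comm (a * b) b, pvRep_add]

theorem pvRep_replicate {α : Type} (a b : Nat) (x : α) :
    pvRep a (List.replicate b x) = List.replicate (a * b) x := by
  induction a with
  | zero => simp [pvRep_zero]
  | succ a ih =>
      rw [pvRep_succ, ih, Nat.succ_mul, Nat.add_comm (a * b) b, List.replicate_add]

theorem pvLoop7_eq (nn t p v ve pa a : Int) (l6 : List Int)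
    (a0 a1 a2 a3 a4 a5 : List Int) (a6 : List (List Int)) :
    pvLoop7 nn t p v ve pa a l6 (a0, a1, a2, a3, a4, a5, a6) =
      (a0 ++ List.replicate l6.length t, a1 ++ List.replicate l6.length p,
       a2 ++ List.replicate l6.length v, a3 ++ List.replicate l6.length ve,
       a4 ++ List.replicate l6.length pa, a5 ++ List.replicate l6.length a,
       a6 ++ l6.map (fun x => [x, nn])) := by
  induction l6 generalizing a0 a1 a2 a3 a4 a5 a6 with
  | nil => simp [pvLoop7]
  | cons x rest ih =>
      rw [show pvLoop7 nn t p v ve pa a (x :: rest) (a0, a1, a2, a3, a4, a5, a6) =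
            pvLoop7 nn t p v ve pa a rest
              (a0 ++ [t], a1 ++ [p], a2 ++ [v], a3 ++ [ve], a4 ++ [pa], a5 ++ [a],
               a6 ++ [[x, nn]]) from rfl, ih]
      simp [List.replicate_succ, List.append_assoc]

theorem pvLoop6_eq (nn t p v ve pa : Int) (l5 l6 : List Int)
    (a0 a1 a2 a3 a4 a5 : List Int) (a6 : List (List Int)) :
    pvLoop6 nn t p v ve pa l5 l6 (a0, a1, a2, a3, a4, a5, a6) =
      (a0 ++ pvRep l5.length (List.replicate l6.length t),
       a1 ++ pvRep l5.length (List.replicate l6.length p),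
       a2 ++ pvRep l5.length (List.replicate l6.length v),
       a3 ++ pvRep l5.length (List.replicate l6.length ve),
       a4 ++ pvRep l5.length (List.replicate l6.length pa),
       a5 ++ l5.flatMap (fun x => List.replicate l6.length x),
       a6 ++ pvRep l5.length (l6.map (fun x => [x, nn]))) := by
  induction l5 generalizing a0 a1 a2 a3 a4 a5 a6 with
  | nil => simp [pvLoop6, pvRep_zero]
  | cons x rest ih =>
      rw [show pvLoop6 nn t p v ve pa (x :: rest) l6 (a0, a1, a2, a3, a4, a5, a6) =
            pvLoop6 nn t p v ve pa rest l6
              (pvLoop7 nn t p v ve pa x l6 (a0, a1, a2, a3, a4, a5, a6)) from rfl,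
          pvLoop7_eq, ih]
      simp [pvRep_succ, List.append_assoc]

theorem pvLoop5_eq (nn t p v ve : Int) (l4 l5 l6 : List Int)
    (a0 a1 a2 a3 a4 a5 : List Int) (a6 : List (List Int)) :
    pvLoop5 nn t p v ve l4 l5 l6 (a0, a1, a2, a3, a4, a5, a6) =
      (a0 ++ pvRep l4.length (pvRep l5.length (List.replicate l6.length t)),
       a1 ++ pvRep l4.length (pvRep l5.length (List.replicate l6.length p)),
       a2 ++ pvRep l4.length (pvRep l5.length (List.replicate l6.length v)),
       a3 ++ pvRep l4.length (pvRep l5.length (List.replicate l6.length ve)),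
       a4 ++ l4.flatMap (fun x => pvRep l5.length (List.replicate l6.length x)),
       a5 ++ pvRep l4.length (l5.flatMap (fun x => List.replicate l6.length x)),
       a6 ++ pvRep l4.length (pvRep l5.length (l6.map (fun x => [x, nn])))) := by
  induction l4 generalizing a0 a1 a2 a3 a4 a5 a6 with
  | nil => simp [pvLoop5, pvRep_zero]
  | cons x rest ih =>
      rw [show pvLoop5 nn t p v ve (x :: rest) l5 l6 (a0, a1, a2, a3, a4, a5, a6) =
            pvLoop5 nn t p v ve rest l5 l6
              (pvLoop6 nn t p v ve x l5 l6 (a0, a1, a2, a3, a4, a5, a6)) from rfl,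
          pvLoop6_eq, ih]
      simp [pvRep_succ, List.append_assoc]

theorem pvLoop4_eq (nn t p v : Int) (l3 l4 l5 l6 : List Int)
    (a0 a1 a2 a3 a4 a5 : List Int) (a6 : List (List Int)) :
    pvLoop4 nn t p v l3 l4 l5 l6 (a0, a1, a2, a3, a4, a5, a6) =
      (a0 ++ pvRep l3.length (pvRep l4.length (pvRep l5.length (List.replicate l6.length t))),
       a1 ++ pvRep l3.length (pvRep l4.length (pvRep l5.length (List.replicate l6.length p))),
       a2 ++ pvRep l3.length (pvRep l4.length (pvRep l5.length (List.replicate l6.length v))),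
       a3 ++ l3.flatMap (fun x => pvRep l4.length (pvRep l5.length (List.replicate l6.length x))),
       a4 ++ pvRep l3.length (l4.flatMap (fun x => pvRep l5.length (List.replicate l6.length x))),
       a5 ++ pvRep l3.length (pvRep l4.length (l5.flatMap (fun x => List.replicate l6.length x))),
       a6 ++ pvRep l3.length (pvRep l4.length (pvRep l5.length (l6.map (fun x => [x, nn]))))) := by
  induction l3 generalizing a0 a1 a2 a3 a4 a5 a6 with
  | nil => simp [pvLoop4, pvRep_zero]
  | cons x rest ih =>
      rw [show pvLoop4 nn t p v (x :: rest) l4 l5 l6 (a0, a1, a2, a3, a4, a5, a6) =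
            pvLoop4 nn t p v rest l4 l5 l6
              (pvLoop5 nn t p v x l4 l5 l6 (a0, a1, a2, a3, a4, a5, a6)) from rfl,
          pvLoop5_eq, ih]
      simp [pvRep_succ, List.append_assoc]

theorem pvLoop3_eq (nn t p : Int) (l2 l3 l4 l5 l6 : List Int)
    (a0 a1 a2 a3 a4 a5 : List Int) (a6 : List (List Int)) :
    pvLoop3 nn t p l2 l3 l4 l5 l6 (a0, a1, a2, a3, a4, a5, a6) =
      (a0 ++ pvRep l2.length (pvRep l3.length (pvRep l4.length (pvRep l5.length (List.replicate l6.length t)))),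
       a1 ++ pvRep l2.length (pvRep l3.length (pvRep l4.length (pvRep l5.length (List.replicate l6.length p)))),
       a2 ++ l2.flatMap (fun x => pvRep l3.length (pvRep l4.length (pvRep l5.length (List.replicate l6.length x)))),
       a3 ++ pvRep l2.length (l3.flatMap (fun x => pvRep l4.length (pvRep l5.length (List.replicate l6.length x)))),
       a4 ++ pvRep l2.length (pvRep l3.length (l4.flatMap (fun x => pvRep l5.length (List.replicate l6.length x)))),
       a5 ++ pvRep l2.length (pvRep l3.length (pvRep l4.length (l5.flatMap (fun x => List.replicate l6.length x)))),
       a6 ++ pvRep l2.length (pvRep l3.length (pvRep l4.length (pvRep l5.length (l6.map (fun x => [x, nn])))))) := by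
  induction l2 generalizing a0 a1 a2 a3 a4 a5 a6 with
  | nil => simp [pvLoop3, pvRep_zero]
  | cons x rest ih =>
      rw [show pvLoop3 nn t p (x :: rest) l3 l4 l5 l6 (a0, a1, a2, a3, a4, a5, a6) =
            pvLoop3 nn t p rest l3 l4 l5 l6
              (pvLoop4 nn t p x l3 l4 l5 l6 (a0, a1, a2, a3, a4, a5, a6)) from rfl,
          pvLoop4_eq, ih]
      simp [pvRep_succ, List.append_assoc]

theorem pvLoop2_eq (nn t : Int) (l1 l2 l3 l4 l5 l6 : List Int)
    (a0 a1 a2 a3 a4 a5 : List Int) (a6 : List (List Int)) :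
    pvLoop2 nn t l1 l2 l3 l4 l5 l6 (a0, a1, a2, a3, a4, a5, a6) =
      (a0 ++ pvRep l1.length (pvRep l2.length (pvRep l3.length (pvRep l4.length (pvRep l5.length (List.replicate l6.length t))))),
       a1 ++ l1.flatMap (fun x => pvRep l2.length (pvRep l3.length (pvRep l4.length (pvRep l5.length (List.replicate l6.length x))))),
       a2 ++ pvRep l1.length (l2.flatMap (fun x => pvRep l3.length (pvRep l4.length (pvRep l5.length (List.replicate l6.length x))))),
       a3 ++ pvRep l1.length (pvRep l2.length (l3.flatMap (fun x => pvRep l4.length (pvRep l5.length (List.replicate l6.length x))))),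
       a4 ++ pvRep l1.length (pvRep l2.length (pvRep l3.length (l4.flatMap (fun x => pvRep l5.length (List.replicate l6.length x))))),
       a5 ++ pvRep l1.length (pvRep l2.length (pvRep l3.length (pvRep l4.length (l5.flatMap (fun x => List.replicate l6.length x))))),
       a6 ++ pvRep l1.length (pvRep l2.length (pvRep l3.length (pvRep l4.length (pvRep l5.length (l6.map (fun x => [x, nn]))))))) := by
  induction l1 generalizing a0 a1 a2 a3 a4 a5 a6 with
  | nil => simp [pvLoop2, pvRep_zero]
  | cons x rest ih =>
      rw [show pvLoop2 nn t (x :: rest) l2 l3 l4 l5 l6 (a0, a1, a2, a3, a4, a5, a6) =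
            pvLoop2 nn t rest l2 l3 l4 l5 l6
              (pvLoop3 nn t x l2 l3 l4 l5 l6 (a0, a1, a2, a3, a4, a5, a6)) from rfl,
          pvLoop3_eq, ih]
      simp [pvRep_succ, List.append_assoc]

theorem pvLoop1_eq (nn : Int) (l0 l1 l2 l3 l4 l5 l6 : List Int)
    (a0 a1 a2 a3 a4 a5 : List Int) (a6 : List (List Int)) :
    pvLoop1 nn l0 l1 l2 l3 l4 l5 l6 (a0, a1, a2, a3, a4, a5, a6) =
      (a0 ++ l0.flatMap (fun x => pvRep l1.length (pvRep l2.length (pvRep l3.length (pvRep l4.length (pvRep l5.length (List.replicate l6.length x)))))),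
       a1 ++ pvRep l0.length (l1.flatMap (fun x => pvRep l2.length (pvRep l3.length (pvRep l4.length (pvRep l5.length (List.replicate l6.length x)))))),
       a2 ++ pvRep l0.length (pvRep l1.length (l2.flatMap (fun x => pvRep l3.length (pvRep l4.length (pvRep l5.length (List.replicate l6.length x)))))),
       a3 ++ pvRep l0.length (pvRep l1.length (pvRep l2.length (l3.flatMap (fun x => pvRep l4.length (pvRep l5.length (List.replicate l6.length x)))))),
       a4 ++ pvRep l0.length (pvRep l1.length (pvRep l2.length (pvRep l3.length (l4.flatMap (fun x => pvRep l5.length (List.replicate l6.length x)))))),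
       a5 ++ pvRep l0.length (pvRep l1.length (pvRep l2.length (pvRep l3.length (pvRep l4.length (l5.flatMap (fun x => List.replicate l6.length x)))))),
       a6 ++ pvRep l0.length (pvRep l1.length (pvRep l2.length (pvRep l3.length (pvRep l4.length (pvRep l5.length (l6.map (fun x => [x, nn])))))))) := by
  induction l0 generalizing a0 a1 a2 a3 a4 a5 a6 with
  | nil => simp [pvLoop1, pvRep_zero]
  | cons x rest ih =>
      rw [show pvLoop1 nn (x :: rest) l1 l2 l3 l4 l5 l6 (a0, a1, a2, a3, a4, a5, a6) =
            pvLoop1 nn rest l1 l2 l3 l4 l5 l6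
              (pvLoop2 nn x l1 l2 l3 l4 l5 l6 (a0, a1, a2, a3, a4, a5, a6)) from rfl,
          pvLoop2_eq, ih]
      simp [pvRep_succ, List.append_assoc]

-- ===== VERDICT (by name: the statement is the Claim_ definition above) =====
theorem transP3_unite_spec : Claim_equal_transP3_unite := by
  intro tl pl vl vel pan atk tc _ _
  unfold Spec_transP3_unite transP3_unite transP3_unite_alt
  apply List.foldl_ext
  intro acc idx _
  obtain ⟨a0, a1, a2, a3, a4, a5, a6⟩ := acc
  rw [pvLoop1_eq]
  simp only [pvTile, pvRep_rep, pvRep_replicate, pvRep_one]
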